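-- pv_equiv track=rewrite | github.com/parabix/parabix-devel-mirror | tools/ztf8/tests/compress_words.py | getPhrase
-- ===== SOURCE A (Python) =====
-- def getPhrase(words, curIdx, numWords, wordsLen):
--     phrase = ""
--     singleByteSyms = 0
--     numWordsCopy = numWords
--     while curIdx < wordsLen and numWords > 0:
--         phrase += words[curIdx]
--         # exclude space and new line character as words in phrases
--         # if len(words[curIdx]) == 1:
--         #    singleByteSyms += 1
--         if words[curIdx] == ' ' or words[curIdx] == '\n':
--             singleByteSyms += 1
--         else:
--             numWords -= 1
--         curIdx += 1
--     if numWords == 0: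
--         return phrase, singleByteSyms
--     return None, -1
-- ===== SOURCE B (Python) =====
-- def getPhrase(words, curIdx, numWords, wordsLen):
--     # Boundary-finding pass: locate the end index of the phrase, then build the
--     # result with one slice-join and a closed-form separator count.
--     if numWords <= 0:
--         return ("", 0) if numWords == 0 else (None, -1)
--     end = curIdx
--     need = numWords
--     while end < wordsLen:
--         w = words[end]
--         if w != ' ' and w != '\n':
--             need -= 1
--         end += 1
--         if need == 0:
--             return ''.join(words[curIdx:end]), (end - curIdx) - numWords
--     return None, -1
-- ===== Notes on version B (the rewrite author's own statement) =====
-- stated objective: alternative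
-- what changed: Replaces A's single interleaved loop that accumulates the phrase string and a separator counter by a boundary-finding index scan, one slice-join for the phrase, and a closed-form separator count (end - curIdx) - numWords.
-- outside the precondition, e.g. on getPhrase(['a'], -1, 1, 1): A returns ('a', 0), B returns ('', 0)
import Mathlib
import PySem

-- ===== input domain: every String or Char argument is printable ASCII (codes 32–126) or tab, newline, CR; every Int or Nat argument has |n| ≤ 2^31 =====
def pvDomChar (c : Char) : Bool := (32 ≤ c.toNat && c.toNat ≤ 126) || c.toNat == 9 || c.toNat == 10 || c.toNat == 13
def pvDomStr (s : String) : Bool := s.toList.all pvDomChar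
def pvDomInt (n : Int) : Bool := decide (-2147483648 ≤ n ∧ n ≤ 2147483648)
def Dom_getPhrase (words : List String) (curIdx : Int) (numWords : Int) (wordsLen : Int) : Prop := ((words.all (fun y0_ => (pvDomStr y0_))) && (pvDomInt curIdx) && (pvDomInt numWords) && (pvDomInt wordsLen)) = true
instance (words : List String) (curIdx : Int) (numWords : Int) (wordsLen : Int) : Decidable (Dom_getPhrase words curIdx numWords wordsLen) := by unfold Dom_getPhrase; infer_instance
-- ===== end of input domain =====

-- B replaces A's interleaved phrase-accumulation loop by a boundary-finding scan,
-- one slice-join and a closed-form separator count (objective: alternative decomposition).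

-- ===== PORT A =====
-- A's while-loop; the string accumulator is carried as a List Char (exact port of
-- Python '+='); fuel = remaining iterations (wordsLen - curIdx), which the loop bounds.
def getPhraseGoA (words : List String) (wordsLen : Int) (fuel : Nat)
    (phrase : List Char) (sbs curIdx numWords : Int) : Option String × Int :=
  match fuel with
  | 0 => if numWords = 0 then (some (String.ofList phrase), sbs) else (none, -1)
  | f + 1 =>
    if curIdx < wordsLen ∧ 0 < numWords then
      match PySem.List.pyGet? words curIdx with
      | none => (none, -1)  -- IndexError in Python; excluded by Pre_getPhrase
      | some w =>
        if w = " " ∨ w = "\n" then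
          getPhraseGoA words wordsLen f (phrase ++ w.toList) (sbs + 1) (curIdx + 1) numWords
        else
          getPhraseGoA words wordsLen f (phrase ++ w.toList) sbs (curIdx + 1) (numWords - 1)
    else if numWords = 0 then (some (String.ofList phrase), sbs) else (none, -1)

def getPhrase (words : List String) (curIdx : Int) (numWords : Int) (wordsLen : Int) : Option String × Int :=
  getPhraseGoA words wordsLen (wordsLen - curIdx).toNat [] 0 curIdx numWords

-- ===== PORT B =====
-- B's boundary-finding loop: advance endI until numWords non-separator elements
-- have been consumed, then slice-join and count the separators arithmetically.
def getPhraseGoB (words : List String) (curIdx numWords wordsLen : Int) (fuel : Nat)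
    (endI need : Int) : Option String × Int :=
  match fuel with
  | 0 => (none, -1)
  | f + 1 =>
    if endI < wordsLen then
      match PySem.List.pyGet? words endI with
      | none => (none, -1)  -- IndexError in Python; excluded by Pre_getPhrase
      | some w =>
        let need' := if w ≠ " " ∧ w ≠ "\n" then need - 1 else need
        if need' = 0 then
          (some (PySem.Str.join "" (PySem.List.slice words (some curIdx) (some (endI + 1)))),
           (endI + 1 - curIdx) - numWords)
        else getPhraseGoB words curIdx numWords wordsLen f (endI + 1) need'
    else (none, -1)

def getPhrase_alt (words : List String) (curIdx : Int) (numWords : Int) (wordsLen : Int) : Option String × Int :=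
  if numWords ≤ 0 then (if numWords = 0 then (some "", 0) else (none, -1))
  else getPhraseGoB words curIdx numWords wordsLen (wordsLen - curIdx).toNat curIdx numWords

-- ===== PRECONDITION & SPEC =====
-- Pre_ excludes (a) negative curIdx when the loop runs (A's value then depends on
-- Python's accidental negative-index wraparound, which B's slice does not reproduce),
-- and (b) inputs where wordsLen exceeds len(words) and the scan runs off the list,
-- on which A raises IndexError.
def Pre_getPhrase (words : List String) (curIdx : Int) (numWords : Int) (wordsLen : Int) : Prop :=
  numWords ≤ 0 ∨ wordsLen ≤ curIdx ∨
    (0 ≤ curIdx ∧ (wordsLen ≤ (words.length : Int) ∨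
      numWords ≤ ((words.drop curIdx.toNat).countP (fun w => decide (w ≠ " " ∧ w ≠ "\n")) : Int)))
instance (words : List String) (curIdx : Int) (numWords : Int) (wordsLen : Int) : Decidable (Pre_getPhrase words curIdx numWords wordsLen) := by unfold Pre_getPhrase; infer_instance

def pvWitness_getPhrase : List String × Int × Int × Int := (["ab", " ", "c"], 0, 2, 3)

def Spec_getPhrase (words : List String) (curIdx : Int) (numWords : Int) (wordsLen : Int) (out : Option String × Int) : Prop := out = getPhrase_alt words curIdx numWords wordsLen
instance (words : List String) (curIdx : Int) (numWords : Int) (wordsLen : Int) (out : Option String × Int) : Decidable (Spec_getPhrase words curIdx numWords wordsLen out) := by unfold Spec_getPhrase; infer_instance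

-- ===== CLAIM (what is proved, stated in full; the proofs are below) =====
def Claim_equal_getPhrase : Prop := ∀ (words : List String) (curIdx : Int) (numWords : Int) (wordsLen : Int), Dom_getPhrase words curIdx numWords wordsLen → Pre_getPhrase words curIdx numWords wordsLen → Spec_getPhrase words curIdx numWords wordsLen (getPhrase words curIdx numWords wordsLen)

-- ===== LEMMAS AND PROOFS =====

-- the phrase A has accumulated after scanning words[a:b] (as a character list)
def phraseOf (words : List String) (a b : Int) : List Char :=
  (((words.drop a.toNat).take (b - a).toNat).map String.toList).flatten

lemma goA_numWords_zero (words : List String) (wordsLen : Int) (fuel : Nat)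
    (phrase : List Char) (sbs curIdx : Int) :
    getPhraseGoA words wordsLen fuel phrase sbs curIdx 0 = (some (String.ofList phrase), sbs) := by
  cases fuel <;> simp [getPhraseGoA]

lemma goA_numWords_neg (words : List String) (wordsLen : Int) (fuel : Nat)
    (phrase : List Char) (sbs curIdx numWords : Int) (h : numWords < 0) :
    getPhraseGoA words wordsLen fuel phrase sbs curIdx numWords = (none, -1) := by
  cases fuel <;>
    simp [getPhraseGoA, (show ¬ numWords = 0 by omega), (show ¬ 0 < numWords by omega)]

lemma phraseOf_self (words : List String) (a : Int) : phraseOf words a a = [] := by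
  simp [phraseOf]

lemma phraseOf_snoc (words : List String) {a b : Int} {w : String}
    (ha : 0 ≤ a) (hab : a ≤ b) (hw : PySem.List.pyGet? words b = some w) :
    phraseOf words a (b + 1) = phraseOf words a b ++ w.toList := by
  have hb : 0 ≤ b := le_trans ha hab
  rw [PySem.List.pyGet?_of_nonneg words hb] at hw
  have hblen : b.toNat < words.length := by
    by_contra hc
    simp [List.getElem?_eq_none (show words.length ≤ b.toNat by omega)] at hw
  have hwe : w = words[b.toNat] := by
    rw [List.getElem?_eq_getElem hblen] at hw
    exact ((Option.some.injEq _ _).mp hw).symm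
  have h1 : (b + 1 - a).toNat = (b - a).toNat + 1 := by omega
  have h2 : (b - a).toNat < (words.drop a.toNat).length := by
    rw [List.length_drop]; omega
  have h3 : (words.drop a.toNat)[(b - a).toNat] = words[b.toNat] := by
    rw [List.getElem_drop]; congr 1; omega
  unfold phraseOf
  rw [h1, List.take_add_one, List.getElem?_eq_getElem h2, h3]
  simp [hwe]

lemma intercalate_nil_eq_flatten (ls : List (List Char)) :
    ([] : List Char).intercalate ls = ls.flatten := by
  induction ls with
  | nil => simp [List.intercalate]
  | cons x xs ih =>
    cases xs with
    | nil => simp [List.intercalate]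
    | cons y ys =>
      simp only [List.intercalate] at ih ⊢
      simp [List.intersperse] at ih ⊢
      exact ih

lemma ofList_phraseOf_eq_join (words : List String) {a b : Int} (ha : 0 ≤ a) (hab : a ≤ b) :
    String.ofList (phraseOf words a b)
      = PySem.Str.join "" (PySem.List.slice words (some a) (some b)) := by
  apply String.toList_inj.mp
  rw [String.toList_ofList, PySem.Str.toList_join,
      PySem.List.slice_toNat words ha (le_trans ha hab)]
  unfold phraseOf PySem.Chars.join
  rw [(show "".toList = ([] : List Char) from rfl), intercalate_nil_eq_flatten]
  rw [(show (b - a).toNat = b.toNat - a.toNat by omega)]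

lemma goA_eq_goB (words : List String) (curIdx numWords wordsLen : Int)
    (hc : 0 ≤ curIdx) (fuel : Nat) :
    ∀ (cur nw : Int), curIdx ≤ cur → 0 < nw →
      getPhraseGoA words wordsLen fuel (phraseOf words curIdx cur)
          ((cur - curIdx) - (numWords - nw)) cur nw
        = getPhraseGoB words curIdx numWords wordsLen fuel cur nw := by
  induction fuel with
  | zero =>
    intro cur nw _ hnw
    simp [getPhraseGoA, getPhraseGoB, (show ¬ nw = 0 by omega)]
  | succ f ih =>
    intro cur nw hcur hnw
    simp only [getPhraseGoA, getPhraseGoB]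
    by_cases hlt : cur < wordsLen
    · rw [if_pos (⟨hlt, hnw⟩ : cur < wordsLen ∧ 0 < nw), if_pos hlt]
      cases hget : PySem.List.pyGet? words cur with
      | none => rfl
      | some w =>
        by_cases hsep : w = " " ∨ w = "\n"
        · have hneed : ¬ (w ≠ " " ∧ w ≠ "\n") := by tauto
          simp only [hneed, if_pos hsep, if_false,
            (show ¬ nw = 0 by omega)]
          rw [← phraseOf_snoc words hc hcur hget,
              (show (cur - curIdx) - (numWords - nw) + 1
                  = ((cur + 1) - curIdx) - (numWords - nw) by ring)]
          exact ih (cur + 1) nw (by omega) hnw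
        · have hneed : (w ≠ " " ∧ w ≠ "\n") := by tauto
          dsimp only
          rw [if_neg hsep, if_pos hneed]
          by_cases hone : nw - 1 = 0
          · rw [if_pos hone, hone, goA_numWords_zero,
                ← phraseOf_snoc words hc hcur hget,
                ofList_phraseOf_eq_join words hc (by omega),
                (show (cur - curIdx) - (numWords - nw) = (cur + 1 - curIdx) - numWords by omega)]
          · rw [if_neg hone]
            rw [← phraseOf_snoc words hc hcur hget,
                (show (cur - curIdx) - (numWords - nw)
                    = ((cur + 1) - curIdx) - (numWords - (nw - 1)) by ring)]
            exact ih (cur + 1) (nw - 1) (by omega) (by omega)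
    · rw [if_neg (by tauto : ¬ (cur < wordsLen ∧ 0 < nw)), if_neg hlt,
          if_neg (show ¬ nw = 0 by omega)]

-- ===== VERDICT (by name: the statement is the Claim_ definition above) =====
theorem getPhrase_spec : Claim_equal_getPhrase := by
  intro words curIdx numWords wordsLen _ hpre
  unfold Spec_getPhrase getPhrase getPhrase_alt
  rcases lt_trichotomy numWords 0 with hneg | hzero | hpos
  · rw [goA_numWords_neg _ _ _ _ _ _ _ hneg,
        if_pos (le_of_lt hneg), if_neg (show ¬ numWords = 0 by omega)]
  · subst hzero
    rw [goA_numWords_zero]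
    simp
  · rw [if_neg (show ¬ numWords ≤ 0 by omega)]
    have hc : wordsLen ≤ curIdx ∨ 0 ≤ curIdx := by
      rcases hpre with h | h | h
      · omega
      · exact Or.inl h
      · exact Or.inr h.1
    rcases hc with hle | hc
    · rw [(show (wordsLen - curIdx).toNat = 0 by omega)]
      simp [getPhraseGoA, getPhraseGoB, (show ¬ numWords = 0 by omega)]
    · have := goA_eq_goB words curIdx numWords wordsLen hc
        ((wordsLen - curIdx).toNat) curIdx numWords le_rfl hpos
      rw [phraseOf_self] at this
      simpa using this
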